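-- pv_equiv track=rewrite | github.com/kauKoala/mocktest-solutions | 19th/코딩테스트 심화반/week2/2632번_피자판매.py | get_sub_sums
-- ===== SOURCE A (Python) =====
-- def get_sub_sums(pizza):
--     n = len(pizza)
--     pizza += pizza  # 피자가 원형이기 때문에 두 배로 늘려서 슬라이싱 가능하게 함
--     result = [0]  # 아무 조각도 선택하지 않은 경우인 0
--
--     # 크기 1부터 n-1까지 조각 수에 대해 가능한 합 계산
--     for size in range(1, n):
--         current = sum(pizza[:size])  # 첫 시작 부분합
--         result.append(current)
--         for i in range(1, n):
--             # 슬라이딩 윈도우로 다음 조각 합 계산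
--             current = current - pizza[i - 1] + pizza[i + size - 1]
--             result.append(current)
--
--     # 전체 피자를 다 고른 경우의 합도 추가
--     result.append(sum(pizza[:n]))
--     return result
-- ===== SOURCE B (Python) =====
-- def get_sub_sums(pizza):
--     n = len(pizza)
--     pizza += pizza  # keep A's in-place doubling of the argument
--     # prefix sums: pre[j] = sum of the first j slices of the doubled pizza
--     pre = [0]
--     total = 0
--     for x in pizza:
--         total += x
--         pre.append(total)
--     result = [0]
--     for size in range(1, n):
--         for s in range(n):
--             result.append(pre[s + size] - pre[s])
--     result.append(pre[n] - pre[0])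
--     return result
-- ===== Notes on version B (the rewrite author's own statement) =====
-- stated objective: faster
-- what changed: Replaces the per-size sliding window (re-summing pizza[:size] for every size) by a single precomputed prefix-sum table, each window sum read off as one difference pre[s+size]-pre[s].
import Mathlib
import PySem

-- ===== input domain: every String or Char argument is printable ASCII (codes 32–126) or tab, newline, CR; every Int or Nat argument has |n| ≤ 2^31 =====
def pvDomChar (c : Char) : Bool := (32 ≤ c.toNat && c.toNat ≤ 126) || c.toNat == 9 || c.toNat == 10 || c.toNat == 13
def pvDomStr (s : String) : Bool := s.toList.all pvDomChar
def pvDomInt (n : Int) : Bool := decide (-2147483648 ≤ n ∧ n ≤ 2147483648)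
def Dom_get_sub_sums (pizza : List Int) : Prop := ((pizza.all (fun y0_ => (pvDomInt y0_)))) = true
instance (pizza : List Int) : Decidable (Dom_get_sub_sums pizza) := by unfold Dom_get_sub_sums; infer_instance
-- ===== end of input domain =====

-- B replaces A's per-size sliding window by one precomputed prefix-sum table read by differences
-- (same return value; A's in-place doubling of the argument is not observable through the return value).

-- ===== PORT A =====
-- A: doubled list, then for each size a sliding window carrying (current, result).
def get_sub_sums (pizza : List Int) : List Int :=
  let n := pizza.length
  let pz := pizza ++ pizza                                -- pizza += pizza
  let result : List Int := [0]
  let result := (List.range' 1 (n - 1)).foldl (fun res size =>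
      let current := (pz.take size).sum                   -- sum(pizza[:size])
      ((List.range' 1 (n - 1)).foldl (fun (st : Int × List Int) i =>
          let c := st.1 - pz.getD (i - 1) 0 + pz.getD (i + size - 1) 0
          (c, st.2 ++ [c])) (current, res ++ [current])).2) result
  result ++ [(pz.take n).sum]                             -- sum(pizza[:n])

-- ===== PORT B =====
-- B: prefix sums pre with pre[j] = sum of first j slices of the doubled list, then differences.
def get_sub_sums_alt (pizza : List Int) : List Int :=
  let n := pizza.length
  let pz := pizza ++ pizza                                -- pizza += pizza
  let pre := (pz.foldl (fun (st : Int × List Int) x =>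
      (st.1 + x, st.2 ++ [st.1 + x])) (0, [0])).2         -- running total, appended
  let result := (List.range' 1 (n - 1)).foldl (fun res size =>
      (List.range n).foldl (fun r s =>
          r ++ [pre.getD (s + size) 0 - pre.getD s 0]) res) [0]
  result ++ [pre.getD n 0 - pre.getD 0 0]

-- ===== PRECONDITION & SPEC =====
def Spec_get_sub_sums (pizza : List Int) (out : List Int) : Prop := out = get_sub_sums_alt pizza
instance (pizza : List Int) (out : List Int) : Decidable (Spec_get_sub_sums pizza out) := by unfold Spec_get_sub_sums; infer_instance

-- ===== CLAIM (what is proved, stated in full; the proofs are below) =====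
def Claim_equal_get_sub_sums : Prop := ∀ (pizza : List Int), Dom_get_sub_sums pizza → Spec_get_sub_sums pizza (get_sub_sums pizza)

-- ===== LEMMAS AND PROOFS =====

-- W d size j = sum of the window of length `size` starting at j, written as a prefix difference.
def pvW (d : List Int) (size j : Nat) : Int := (d.take (j + size)).sum - (d.take j).sum

theorem pv_takeSum_succ (d : List Int) (j : Nat) :
    (d.take (j + 1)).sum = (d.take j).sum + d.getD j 0 := by
  induction d generalizing j with
  | nil => simp
  | cons x d ih =>
    cases j with
    | zero => simp
    | succ j => simp [List.take_succ_cons, ih j]; ring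

theorem pvW_step (d : List Int) (size j : Nat) :
    pvW d size (j + 1) = pvW d size j - d.getD j 0 + d.getD (j + size) 0 := by
  have h1 := pv_takeSum_succ d (j + size)
  have h2 := pv_takeSum_succ d j
  simp only [pvW]
  have : j + 1 + size = j + size + 1 := by omega
  rw [this, h1, h2]; ring

-- A's inner sliding-window loop, characterised.
theorem pv_slide (d : List Int) (size : Nat) :
    ∀ (k j : Nat) (res : List Int),
      ((List.range' (j + 1) k).foldl (fun (st : Int × List Int) i =>
          let c := st.1 - d.getD (i - 1) 0 + d.getD (i + size - 1) 0
          (c, st.2 ++ [c])) (pvW d size j, res))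
      = (pvW d size (j + k), res ++ (List.range' (j + 1) k).map (fun i => pvW d size i)) := by
  intro k
  induction k with
  | zero => intro j res; simp
  | succ k ih =>
    intro j res
    rw [List.range'_succ]
    simp only [List.foldl_cons, List.map_cons]
    have hi1 : j + 1 - 1 = j := by omega
    have hi2 : j + 1 + size - 1 = j + size := by omega
    have hc : pvW d size j - d.getD (j + 1 - 1) 0 + d.getD (j + 1 + size - 1) 0
        = pvW d size (j + 1) := by rw [hi1, hi2, pvW_step]
    simp only [hc]
    have := ih (j + 1) (res ++ [pvW d size (j + 1)])
    rw [show j + 1 + 1 = j + 2 by rfl] at this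
    rw [this, show j + 1 + k = j + (k + 1) from by omega]
    simp

-- B's prefix-sum table, characterised.
theorem pv_pre_eq (d : List Int) :
    ∀ (t : Int) (acc : List Int),
      (d.foldl (fun (st : Int × List Int) x => (st.1 + x, st.2 ++ [st.1 + x])) (t, acc)).2
      = acc ++ (List.range d.length).map (fun j => t + (d.take (j + 1)).sum) := by
  induction d with
  | nil => intro t acc; simp
  | cons x d ih =>
    intro t acc
    simp only [List.foldl_cons, List.length_cons, List.range_succ_eq_map, List.map_cons,
      List.map_map]
    rw [ih (t + x) (acc ++ [t + x])]
    simp only [List.take_succ_cons, List.sum_cons, List.append_assoc, List.singleton_append]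
    congr 2
    · simp
    · apply List.map_congr_left; intro j _; simp [Function.comp]; ring

theorem pv_pre_getD (d : List Int) (j : Nat) (hj : j ≤ d.length) :
    ((d.foldl (fun (st : Int × List Int) x => (st.1 + x, st.2 ++ [st.1 + x])) (0, ([0] : List Int))).2).getD j 0
      = (d.take j).sum := by
  rw [pv_pre_eq]
  cases j with
  | zero => simp
  | succ j =>
    have hj' : j < d.length := by omega
    rw [List.getD_eq_getElem?_getD]
    simp [hj']

theorem get_sub_sums_spec : Claim_equal_get_sub_sums := by
  unfold Claim_equal_get_sub_sums Spec_get_sub_sums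
  intro pizza _
  unfold get_sub_sums get_sub_sums_alt
  simp only []
  set n := pizza.length with hn
  set pz := pizza ++ pizza with hpz
  have hlen : pz.length = 2 * n := by simp [hpz, hn]; omega
  -- replace B's pre-lookups and the trailing element
  have hpre : ∀ j, j ≤ 2 * n →
      ((pz.foldl (fun (st : Int × List Int) x => (st.1 + x, st.2 ++ [st.1 + x])) (0, ([0] : List Int))).2).getD j 0
        = (pz.take j).sum := fun j hj => pv_pre_getD pz j (by omega)
  -- A's outer step equals appending the block of window sums for that size
  have hA : (List.range' 1 (n - 1)).foldl (fun res size =>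
        let current := (pz.take size).sum
        ((List.range' 1 (n - 1)).foldl (fun (st : Int × List Int) i =>
            let c := st.1 - pz.getD (i - 1) 0 + pz.getD (i + size - 1) 0
            (c, st.2 ++ [c])) (current, res ++ [current])).2) [0]
      = (List.range' 1 (n - 1)).foldl (fun res size =>
          res ++ ((List.range' 0 n).map (fun i => pvW pz size i))) [0] := by
    apply PySem.List.foldl_congr_mem
    intro res size hsz
    have hcur : (pz.take size).sum = pvW pz size 0 := by simp [pvW]
    simp only [hcur]
    have := pv_slide pz size (n - 1) 0 (res ++ [pvW pz size 0])
    simp only [Nat.zero_add] at this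
    rw [this]
    have hmem := List.mem_range'.mp hsz
    have hn1 : 1 ≤ n := by omega
    rw [show (List.range' 0 n) = 0 :: List.range' 1 (n - 1) from by
      conv_lhs => rw [show n = (n - 1) + 1 from by omega]
      rw [List.range'_succ]]
    simp
  have hB : (List.range' 1 (n - 1)).foldl (fun res size =>
        (List.range n).foldl (fun r s =>
            r ++ [((pz.foldl (fun (st : Int × List Int) x => (st.1 + x, st.2 ++ [st.1 + x])) (0, ([0] : List Int))).2).getD (s + size) 0
              - ((pz.foldl (fun (st : Int × List Int) x => (st.1 + x, st.2 ++ [st.1 + x])) (0, ([0] : List Int))).2).getD s 0]) res) [0]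
      = (List.range' 1 (n - 1)).foldl (fun res size =>
          res ++ ((List.range' 0 n).map (fun i => pvW pz size i))) [0] := by
    apply PySem.List.foldl_congr_mem
    intro res size hsz
    have hmem := List.mem_range'.mp hsz
    rw [List.range_eq_range']
    rw [show (List.range' 0 n).foldl (fun r s =>
            r ++ [((pz.foldl (fun (st : Int × List Int) x => (st.1 + x, st.2 ++ [st.1 + x])) (0, ([0] : List Int))).2).getD (s + size) 0
              - ((pz.foldl (fun (st : Int × List Int) x => (st.1 + x, st.2 ++ [st.1 + x])) (0, ([0] : List Int))).2).getD s 0]) res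
        = (List.range' 0 n).foldl (fun r s => r ++ [pvW pz size s]) res from ?_]
    · rw [PySem.List.foldl_append_eq_flatMap, ← List.map_eq_flatMap]
    · apply PySem.List.foldl_congr_mem
      intro r s hs
      have hsmem := List.mem_range'.mp hs
      rw [hpre (s + size) (by omega), hpre s (by omega)]
      simp [pvW]
  rw [hA, hB, hpre n (by omega), hpre 0 (by omega)]
  simp
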